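-- pv_equiv track=rewrite | github.com/AyayaXiaowang/Ayaya_Miliastra_Editor | private_extensions/ugc_file_tools/contracts/node_graph_type_mappings.py | _try_parse_generic_two_tokens
-- ===== SOURCE A (Python) =====
-- def _try_parse_generic_two_tokens(inner: str) -> tuple[str, str] | None:
--     """
--     解析形如 `X<A,B>` 的 inner（已去掉外层前缀/后缀）为两个 token。
--
--     约束：仅用于 TypeMappings 文本；token 内可能嵌套泛型（如 D<Int,Gid>），因此需要按 <> 深度切分。
--     """
--     s = str(inner or "").strip()
--     if s == "":
--         return None
--     parts: list[str] = []
--     buf: list[str] = []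
--     depth = 0
--     for ch in s:
--         if ch == "<":
--             depth += 1
--         elif ch == ">":
--             if depth > 0:
--                 depth -= 1
--         if ch == "," and depth == 0:
--             token = "".join(buf).strip()
--             if token != "":
--                 parts.append(token)
--             buf = []
--             continue
--         buf.append(ch)
--     last = "".join(buf).strip()
--     if last != "":
--         parts.append(last)
--     if len(parts) != 2:
--         return None
--     return str(parts[0]).strip(), str(parts[1]).strip()
-- ===== SOURCE B (Python) =====
-- def _top_comma_index(t):
--     """Index of the first comma at <>-depth 0 in t, or None."""
--     d = 0
--     for i, ch in enumerate(t):
--         if ch == "<":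
--             d += 1
--         elif ch == ">" and d > 0:
--             d -= 1
--         elif ch == "," and d == 0:
--             return i
--     return None
--
--
-- def _try_parse_generic_two_tokens(inner: str) -> tuple[str, str] | None:
--     s = (inner or "").strip()
--     if s == "":
--         return None
--     toks = []
--     rest = s
--     while True:
--         i = _top_comma_index(rest)
--         head = (rest if i is None else rest[:i]).strip()
--         if head != "":
--             toks.append(head)
--         if i is None:
--             break
--         rest = rest[i + 1:]
--     if len(toks) != 2:
--         return None
--     return toks[0], toks[1]
-- ===== Notes on version B (the rewrite author's own statement) =====
-- stated objective: alternative
-- what changed: B replaces A's single character loop that maintains a token buffer, a parts accumulator and a threaded depth with a find-and-slice decomposition: a helper scans for the next depth-0 comma (depth restarting at 0 per segment), the outer loop slices the string at that index, strips the slice, and repeats on the remainder.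
import Mathlib
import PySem

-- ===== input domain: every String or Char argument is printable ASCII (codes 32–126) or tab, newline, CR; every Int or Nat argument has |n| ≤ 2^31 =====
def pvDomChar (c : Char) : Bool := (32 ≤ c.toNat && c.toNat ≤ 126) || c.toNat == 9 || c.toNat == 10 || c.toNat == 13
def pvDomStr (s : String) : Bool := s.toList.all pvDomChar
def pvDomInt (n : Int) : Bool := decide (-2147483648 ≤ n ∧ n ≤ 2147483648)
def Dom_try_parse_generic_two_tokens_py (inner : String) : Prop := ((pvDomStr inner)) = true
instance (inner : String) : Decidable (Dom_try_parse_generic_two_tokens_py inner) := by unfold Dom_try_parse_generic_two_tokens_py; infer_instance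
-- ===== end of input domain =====

-- B is an alternative decomposition (find-next-top-level-comma + slice) of A's buffer loop; equal return value proved on all inputs.

-- ===== PORT A =====
-- the body of A's `for ch in s` loop, as a named step function over the state (parts, buf, depth)
def pvStepA (acc : List (List Char) × List Char × Int) (ch : Char) : List (List Char) × List Char × Int :=
  match acc with
  | (parts, buf, depth) =>
    let depth : Int :=
      if ch = '<' then depth + 1
      else if ch = '>' then (if depth > 0 then depth - 1 else depth)
      else depth
    if ch = ',' ∧ depth = 0 then
      let token := PySem.Chars.strip buf
      ((if token ≠ [] then parts ++ [token] else parts), ([] : List Char), depth)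
    else (parts, buf ++ [ch], depth)

def try_parse_generic_two_tokens_py (inner : String) : Option (String × String) :=
  let s := PySem.Chars.strip inner.toList
  if s = [] then none
  else
    let st := s.foldl pvStepA (([] : List (List Char)), ([] : List Char), (0 : Int))
    let last := PySem.Chars.strip st.2.1
    let parts := if last ≠ [] then st.1 ++ [last] else st.1
    if parts.length ≠ 2 then none
    else some (String.ofList (PySem.Chars.strip parts[0]!), String.ofList (PySem.Chars.strip parts[1]!))

-- ===== PORT B =====
-- _top_comma_index(t): recursion over the characters, carrying the local depth, returning the relative index
def pvTopCommaIdx : List Char → Int → Option Nat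
  | [], _ => none
  | ch :: cs, d =>
    if ch = '<' then (pvTopCommaIdx cs (d + 1)).map (· + 1)
    else if ch = '>' ∧ d > 0 then (pvTopCommaIdx cs (d - 1)).map (· + 1)
    else if ch = ',' ∧ d = 0 then some 0
    else (pvTopCommaIdx cs d).map (· + 1)

theorem pvTopCommaIdx_ne_nil {cs : List Char} {d : Int} {i : Nat}
    (h : pvTopCommaIdx cs d = some i) : cs ≠ [] := by
  intro hnil; subst hnil; simp [pvTopCommaIdx] at h

-- B's while loop: slice off the segment before the found comma, recurse on the remainder
def pvTokens (rest : List Char) : List (List Char) :=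
  match h : pvTopCommaIdx rest 0 with
  | none =>
    let head := PySem.Chars.strip rest
    if head ≠ [] then [head] else []
  | some i =>
    let head := PySem.Chars.strip (rest.take i)
    (if head ≠ [] then [head] else []) ++ pvTokens (rest.drop (i + 1))
termination_by rest.length
decreasing_by
  have hne := pvTopCommaIdx_ne_nil h
  have hpos : 0 < rest.length := List.length_pos_iff.mpr hne
  simp [List.length_drop]; omega

def try_parse_generic_two_tokens_py_alt (inner : String) : Option (String × String) :=
  let s := PySem.Chars.strip inner.toList
  if s = [] then none
  else
    let toks := pvTokens s
    if toks.length ≠ 2 then none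
    else some (String.ofList toks[0]!, String.ofList toks[1]!)

-- ===== PRECONDITION & SPEC =====
def Spec_try_parse_generic_two_tokens_py (inner : String) (out : Option (String × String)) : Prop := out = try_parse_generic_two_tokens_py_alt inner
instance (inner : String) (out : Option (String × String)) : Decidable (Spec_try_parse_generic_two_tokens_py inner out) := by unfold Spec_try_parse_generic_two_tokens_py; infer_instance

-- ===== CLAIM (what is proved, stated in full; the proofs are below) =====
def Claim_equal_try_parse_generic_two_tokens_py : Prop := ∀ (inner : String), Dom_try_parse_generic_two_tokens_py inner → Spec_try_parse_generic_two_tokens_py inner (try_parse_generic_two_tokens_py inner)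

-- ===== LEMMAS AND PROOFS =====

-- common specification: the raw segments of cs split at depth-0 commas, threading the depth d
def pvUpd (d : Int) (ch : Char) : Int :=
  if ch = '<' then d + 1 else if ch = '>' then (if d > 0 then d - 1 else d) else d

def pvConsHead (ch : Char) : List (List Char) → List (List Char)
  | [] => [[ch]]
  | s :: ss => (ch :: s) :: ss

def pvSegs : List Char → Int → List (List Char)
  | [], _ => [[]]
  | ch :: cs, d =>
    let d' := pvUpd d ch
    if ch = ',' ∧ d' = 0 then [] :: pvSegs cs d' else pvConsHead ch (pvSegs cs d')

def pvPrep (buf : List Char) : List (List Char) → List (List Char)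
  | [] => [buf]
  | s :: ss => (buf ++ s) :: ss

theorem pvSegs_ne_nil (cs : List Char) (d : Int) : pvSegs cs d ≠ [] := by
  cases cs with
  | nil => simp [pvSegs]
  | cons ch cs =>
    simp only [pvSegs]
    split
    · simp
    · cases pvSegs cs (pvUpd d ch) <;> simp [pvConsHead]

theorem pvPrep_nil (S : List (List Char)) (hS : S ≠ []) : pvPrep [] S = S := by
  cases S with
  | nil => exact absurd rfl hS
  | cons s ss => simp [pvPrep]

theorem pvPrep_consHead (buf : List Char) (ch : Char) (S : List (List Char)) :
    pvPrep buf (pvConsHead ch S) = pvPrep (buf ++ [ch]) S := by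
  cases S <;> simp [pvPrep, pvConsHead]

-- A's loop, finished by the trailing-buffer flush, computes the stripped non-empty segments
theorem lemA (cs : List Char) : ∀ (parts : List (List Char)) (buf : List Char) (d : Int),
    (if PySem.Chars.strip (cs.foldl pvStepA (parts, buf, d)).2.1 ≠ [] then
        (cs.foldl pvStepA (parts, buf, d)).1 ++ [PySem.Chars.strip (cs.foldl pvStepA (parts, buf, d)).2.1]
      else (cs.foldl pvStepA (parts, buf, d)).1)
    = parts ++ ((pvPrep buf (pvSegs cs d)).map PySem.Chars.strip).filter (· ≠ []) := by
  induction cs with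
  | nil =>
    intro parts buf d
    simp only [List.foldl_nil, pvSegs, pvPrep, List.append_nil, List.map, List.filter]
    split_ifs with h
    · simp at h ⊢; simp [h]
    · simp at h; simp [h]
  | cons ch cs ih =>
    intro parts buf d
    by_cases hc : ch = ',' ∧ pvUpd d ch = 0
    · have hstep : pvStepA (parts, buf, d) ch =
          ((if PySem.Chars.strip buf ≠ [] then parts ++ [PySem.Chars.strip buf] else parts),
            ([] : List Char), pvUpd d ch) := by
        simp only [pvStepA, pvUpd] at hc ⊢
        rw [if_pos hc]
      rw [List.foldl_cons, hstep, ih]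
      have hseg : pvSegs (ch :: cs) d = [] :: pvSegs cs (pvUpd d ch) := by
        simp only [pvSegs]
        rw [if_pos hc]
      rw [hseg, pvPrep_nil _ (pvSegs_ne_nil cs (pvUpd d ch))]
      have hp : pvPrep buf ([] :: pvSegs cs (pvUpd d ch)) = buf :: pvSegs cs (pvUpd d ch) := by
        simp [pvPrep]
      rw [hp]
      by_cases hne : PySem.Chars.strip buf = [] <;>
        simp [hne]
    · have hstep : pvStepA (parts, buf, d) ch = (parts, buf ++ [ch], pvUpd d ch) := by
        simp only [pvStepA, pvUpd] at hc ⊢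
        rw [if_neg hc]
      rw [List.foldl_cons, hstep, ih]
      have hseg : pvSegs (ch :: cs) d = pvConsHead ch (pvSegs cs (pvUpd d ch)) := by
        simp only [pvSegs]
        rw [if_neg hc]
      rw [hseg, pvPrep_consHead]

-- characterisation of the helper: no comma found means one segment; a comma at i splits off cs.take i
theorem lemFT (cs : List Char) : ∀ (d : Int),
    (pvTopCommaIdx cs d = none → pvSegs cs d = [cs]) ∧
    (∀ i, pvTopCommaIdx cs d = some i →
      pvSegs cs d = cs.take i :: pvSegs (cs.drop (i + 1)) 0) := by
  induction cs with
  | nil =>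
    intro d
    refine ⟨fun _ => by simp [pvSegs], fun i h => by simp [pvTopCommaIdx] at h⟩
  | cons ch cs ih =>
    intro d
    by_cases h1 : ch = '<'
    · subst h1
      have hu : pvUpd d '<' = d + 1 := by simp [pvUpd]
      have hcomma : ¬('<' = ',' ∧ pvUpd d '<' = 0) := by simp
      have hseg : pvSegs ('<' :: cs) d = pvConsHead '<' (pvSegs cs (d + 1)) := by
        simp only [pvSegs]; rw [if_neg hcomma, hu]
      have htc : pvTopCommaIdx ('<' :: cs) d = (pvTopCommaIdx cs (d + 1)).map (· + 1) := by
        simp [pvTopCommaIdx]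
      constructor
      · intro hn
        rw [htc] at hn
        cases hr : pvTopCommaIdx cs (d + 1) with
        | none => rw [hseg, (ih (d + 1)).1 hr]; simp [pvConsHead]
        | some j => rw [hr] at hn; simp at hn
      · intro i hs
        rw [htc] at hs
        cases hr : pvTopCommaIdx cs (d + 1) with
        | none => rw [hr] at hs; simp at hs
        | some j =>
          rw [hr] at hs; simp at hs
          subst hs
          rw [hseg, (ih (d + 1)).2 j hr]
          simp [pvConsHead, List.take_succ_cons, List.drop_succ_cons]
    · by_cases h2 : ch = '>' ∧ d > 0
      · obtain ⟨h2c, h2d⟩ := h2; subst h2c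
        have hu : pvUpd d '>' = d - 1 := by simp [pvUpd, h2d]
        have hcomma : ¬('>' = ',' ∧ pvUpd d '>' = 0) := by simp
        have hseg : pvSegs ('>' :: cs) d = pvConsHead '>' (pvSegs cs (d - 1)) := by
          simp only [pvSegs]; rw [if_neg hcomma, hu]
        have htc : pvTopCommaIdx ('>' :: cs) d = (pvTopCommaIdx cs (d - 1)).map (· + 1) := by
          simp [pvTopCommaIdx, h2d]
        constructor
        · intro hn
          rw [htc] at hn
          cases hr : pvTopCommaIdx cs (d - 1) with
          | none => rw [hseg, (ih (d - 1)).1 hr]; simp [pvConsHead]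
          | some j => rw [hr] at hn; simp at hn
        · intro i hs
          rw [htc] at hs
          cases hr : pvTopCommaIdx cs (d - 1) with
          | none => rw [hr] at hs; simp at hs
          | some j =>
            rw [hr] at hs; simp at hs
            subst hs
            rw [hseg, (ih (d - 1)).2 j hr]
            simp [pvConsHead, List.take_succ_cons, List.drop_succ_cons]
      · by_cases h3 : ch = ',' ∧ d = 0
        · obtain ⟨h3c, h3d⟩ := h3; subst h3c; subst h3d
          have hseg : pvSegs (',' :: cs) 0 = [] :: pvSegs cs 0 := by
            simp [pvSegs, pvUpd]
          have htc : pvTopCommaIdx (',' :: cs) 0 = some 0 := by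
            simp [pvTopCommaIdx, h1]
          constructor
          · intro hn; rw [htc] at hn; simp at hn
          · intro i hs
            rw [htc] at hs; simp at hs
            subst hs
            simpa using hseg
        · have hu : pvUpd d ch = d := by
            simp only [pvUpd]
            rw [if_neg h1]
            by_cases hgt : ch = '>'
            · subst hgt
              have : ¬d > 0 := fun hd => h2 ⟨rfl, hd⟩
              simp [this]
            · rw [if_neg hgt]
          have hcomma : ¬(ch = ',' ∧ pvUpd d ch = 0) := by
            rw [hu]; exact h3
          have hseg : pvSegs (ch :: cs) d = pvConsHead ch (pvSegs cs d) := by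
            simp only [pvSegs]; rw [if_neg hcomma, hu]
          have htc : pvTopCommaIdx (ch :: cs) d = (pvTopCommaIdx cs d).map (· + 1) := by
            simp only [pvTopCommaIdx]
            rw [if_neg h1, if_neg h2, if_neg h3]
          constructor
          · intro hn
            rw [htc] at hn
            cases hr : pvTopCommaIdx cs d with
            | none => rw [hseg, (ih d).1 hr]; simp [pvConsHead]
            | some j => rw [hr] at hn; simp at hn
          · intro i hs
            rw [htc] at hs
            cases hr : pvTopCommaIdx cs d with
            | none => rw [hr] at hs; simp at hs
            | some j =>
              rw [hr] at hs; simp at hs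
              subst hs
              rw [hseg, (ih d).2 j hr]
              simp [pvConsHead, List.take_succ_cons, List.drop_succ_cons]

-- B's while loop computes the stripped non-empty segments
theorem lemBaux : ∀ (n : Nat) (cs : List Char), cs.length < n →
    pvTokens cs = ((pvSegs cs 0).map PySem.Chars.strip).filter (· ≠ []) := by
  intro n
  induction n with
  | zero => intro cs h; omega
  | succ n ih =>
    intro cs hlen
    rw [pvTokens.eq_def]
    split
    next heq =>
      rw [(lemFT cs 0).1 heq]
      by_cases hne : PySem.Chars.strip cs = [] <;> simp [hne]
    next i heq =>
      have hne := pvTopCommaIdx_ne_nil heq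
      have hpos : 0 < cs.length := List.length_pos_iff.mpr hne
      have hdrop : (cs.drop (i + 1)).length < n := by
        simp only [List.length_drop]; omega
      rw [ih _ hdrop, (lemFT cs 0).2 i heq]
      by_cases hne2 : PySem.Chars.strip (cs.take i) = [] <;>
        simp [hne2]

theorem lemB (cs : List Char) :
    pvTokens cs = ((pvSegs cs 0).map PySem.Chars.strip).filter (· ≠ []) :=
  lemBaux (cs.length + 1) cs (by omega)

-- strip is idempotent
theorem pvDropWhile_idem {α : Type} (p : α → Bool) (l : List α) :
    List.dropWhile p (List.dropWhile p l) = List.dropWhile p l := by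
  induction l with
  | nil => simp
  | cons x xs ih =>
    by_cases h : p x
    · simp [h, ih]
    · simp [h]

theorem pvRstrip_prefix (t : List Char) : PySem.Chars.rstrip t <+: t := by
  have h := List.dropWhile_suffix (l := t.reverse) (p := PySem.Chars.isspace)
  have := h.reverse
  simpa [PySem.Chars.rstrip] using this

theorem pvStrip_idem (s : List Char) :
    PySem.Chars.strip (PySem.Chars.strip s) = PySem.Chars.strip s := by
  simp only [PySem.Chars.strip]
  set t := PySem.Chars.lstrip s with ht
  have hlr : PySem.Chars.lstrip (PySem.Chars.rstrip t) = PySem.Chars.rstrip t := by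
    cases hrt : PySem.Chars.rstrip t with
    | nil => simp [PySem.Chars.lstrip]
    | cons x xs =>
      have hpre : (x :: xs) <+: t := hrt ▸ pvRstrip_prefix t
      obtain ⟨r, hr⟩ := hpre
      have hx : PySem.Chars.isspace x = false := by
        have hhead : t.head? = some x := by rw [← hr]; simp
        have ht' : t = List.dropWhile PySem.Chars.isspace s := by
          rw [ht]; simp [PySem.Chars.lstrip]
        have hm := List.head?_dropWhile_not PySem.Chars.isspace s
        rw [← ht', hhead] at hm
        simpa using hm
      simp [PySem.Chars.lstrip, hx]
  rw [hlr]
  simp only [PySem.Chars.rstrip, List.reverse_reverse]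
  rw [pvDropWhile_idem]


-- ===== VERDICT (by name: the statement is the Claim_ definition above) =====
theorem try_parse_generic_two_tokens_py_spec : Claim_equal_try_parse_generic_two_tokens_py := by
  intro inner _
  unfold Spec_try_parse_generic_two_tokens_py
  unfold try_parse_generic_two_tokens_py try_parse_generic_two_tokens_py_alt
  simp only []
  by_cases hs : PySem.Chars.strip inner.toList = []
  · simp [hs]
  · rw [if_neg hs, if_neg hs]
    have hA := lemA (PySem.Chars.strip inner.toList) [] [] 0
    rw [pvPrep_nil _ (pvSegs_ne_nil _ _)] at hA
    rw [← lemB] at hA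
    simp only [List.nil_append] at hA
    set toks := pvTokens (PySem.Chars.strip inner.toList) with htoks
    rw [hA]
    by_cases hlen : toks.length ≠ 2
    · rw [if_pos hlen, if_pos hlen]
    · rw [if_neg hlen, if_neg hlen]
      simp at hlen
      obtain ⟨a, b, hab⟩ := List.length_eq_two.mp hlen
      have hmem : ∀ x ∈ toks, PySem.Chars.strip x = x := by
        intro x hx
        rw [htoks, lemB] at hx
        have := List.mem_of_mem_filter hx
        obtain ⟨z, _, rfl⟩ := List.mem_map.mp this
        exact pvStrip_idem z
      rw [hab]
      simp only [List.getElem!_cons_zero, List.getElem!_cons_succ]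
      rw [hmem a (hab ▸ (by simp)), hmem b (hab ▸ (by simp))]
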